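-- pv_equiv track=rewrite | github.com/AndresMontero/coding_interview | problems/largest_mountain.py | largest_mountain_dp
-- ===== SOURCE A (Python) =====
-- def largest_mountain_dp(arr):
--     n = len(arr)
--     max_height = 0
--
--     # Initialize arrays to store slopes
--     left_slope = [0] * n
--     right_slope = [0] * n
--
--     # Calculate slopes from left to right
--     for i in range(1, n):
--         if arr[i] > arr[i - 1]:
--             left_slope[i] = left_slope[i - 1] + 1
--
--     # Calculate slopes from right to left
--     for i in range(n - 2, -1, -1):
--         if arr[i] > arr[i + 1]:
--             right_slope[i] = right_slope[i + 1] + 1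
--
--     # Find the tallest mountain
--     for i in range(1, n - 1):
--         left = left_slope[i]
--         right = right_slope[i]
--
--         # To form a mountain, both sides need at least one downslope
--         if left == 0 or right == 0:
--             continue
--
--         # Height is determined by the minimum slope on either side, capped by the original height
--         height = min(left, right, arr[i])
--
--         # Update the maximum height
--         max_height = max(max_height, height)
--
--     return max_height
-- ===== SOURCE B (Python) =====
-- def largest_mountain_dp(arr):
--     # Single forward pass with up/down counters and a remembered peak value;
--     # no auxiliary arrays.
--     best = 0
--     up = 0
--     down = 0
--     peak = 0
--     for i in range(1, len(arr)):
--         x = arr[i]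
--         y = arr[i - 1]
--         if x > y:
--             up = 1 if down > 0 else up + 1
--             down = 0
--         elif x < y:
--             if up > 0:
--                 if down == 0:
--                     peak = y
--                 down += 1
--                 h = min(up, down, peak)
--                 if h > best:
--                     best = h
--         else:
--             up = 0
--             down = 0
--     return best
-- ===== Notes on version B (the rewrite author's own statement) =====
-- stated objective: faster
-- what changed: Replaces the two O(n) auxiliary slope arrays (left-to-right pass, right-to-left pass, then a third combining scan) with a single forward pass that keeps up/down run counters and the remembered peak value, accumulating the answer as each mountain's descent progresses.
import Mathlib
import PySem

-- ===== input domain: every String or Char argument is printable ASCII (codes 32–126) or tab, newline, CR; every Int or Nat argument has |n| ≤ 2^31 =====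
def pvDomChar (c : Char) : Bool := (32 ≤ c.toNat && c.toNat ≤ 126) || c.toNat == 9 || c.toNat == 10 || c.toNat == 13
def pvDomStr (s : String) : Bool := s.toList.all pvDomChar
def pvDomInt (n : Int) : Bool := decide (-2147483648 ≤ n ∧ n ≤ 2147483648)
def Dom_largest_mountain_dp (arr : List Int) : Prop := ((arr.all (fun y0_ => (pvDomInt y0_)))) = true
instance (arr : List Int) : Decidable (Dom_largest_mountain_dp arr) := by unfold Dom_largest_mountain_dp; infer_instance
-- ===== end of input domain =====

-- B replaces A's two DP slope arrays and final scan by a single forward pass with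
-- up/down counters and a remembered peak value (objective: faster, constant factor).

-- ===== PORT A =====
-- left-to-right slope loop of A (indices produced by range(1, n) are always in range)
def pvAleft (arr : List Int) (k : Int) : List Int :=
  (PySem.List.pyRange 1 k 1).foldl
    (fun ls i =>
      if PySem.List.pyGetD arr (i - 1) 0 < PySem.List.pyGetD arr i 0 then
        PySem.List.pySetD ls i (PySem.List.pyGetD ls (i - 1) 0 + 1)
      else ls)
    (List.replicate arr.length (0 : Int))

-- right-to-left slope loop of A (indices produced by range(n-2, -1, -1) are always in range)
def pvAright (arr : List Int) (k : Int) : List Int :=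
  (PySem.List.pyRange k (-1) (-1)).foldl
    (fun rs i =>
      if PySem.List.pyGetD arr (i + 1) 0 < PySem.List.pyGetD arr i 0 then
        PySem.List.pySetD rs i (PySem.List.pyGetD rs (i + 1) 0 + 1)
      else rs)
    (List.replicate arr.length (0 : Int))

def largest_mountain_dp (arr : List Int) : Int :=
  let left := pvAleft arr (arr.length : Int)
  let right := pvAright arr ((arr.length : Int) - 2)
  (PySem.List.pyRange 1 ((arr.length : Int) - 1) 1).foldl
    (fun best i =>
      let l := PySem.List.pyGetD left i 0
      let r := PySem.List.pyGetD right i 0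
      if l = 0 ∨ r = 0 then best
      else max best (min l (min r (PySem.List.pyGetD arr i 0))))
    0

-- ===== PORT B =====
-- state is (best, up, down, peak); one forward pass over adjacent pairs
def pvBloop (arr : List Int) : Int × Int × Int × Int :=
  (PySem.List.pyRange 1 (arr.length : Int) 1).foldl
    (fun (s : Int × Int × Int × Int) i =>
      let best := s.1
      let up := s.2.1
      let down := s.2.2.1
      let peak := s.2.2.2
      let x := PySem.List.pyGetD arr i 0
      let y := PySem.List.pyGetD arr (i - 1) 0
      if y < x then
        (best, if 0 < down then 1 else up + 1, 0, peak)
      else if x < y then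
        if 0 < up then
          let peak' := if down = 0 then y else peak
          let down' := down + 1
          let h := min up (min down' peak')
          (if best < h then h else best, up, down', peak')
        else (best, up, down, peak)
      else (best, 0, 0, peak))
    (0, 0, 0, 0)

def largest_mountain_dp_alt (arr : List Int) : Int := (pvBloop arr).1

-- ===== PRECONDITION & SPEC =====
def Spec_largest_mountain_dp (arr : List Int) (out : Int) : Prop := out = largest_mountain_dp_alt arr
instance (arr : List Int) (out : Int) : Decidable (Spec_largest_mountain_dp arr out) := by unfold Spec_largest_mountain_dp; infer_instance

-- ===== CLAIM (what is proved, stated in full; the proofs are below) =====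
def Claim_equal_largest_mountain_dp : Prop := ∀ (arr : List Int), Dom_largest_mountain_dp arr → Spec_largest_mountain_dp arr (largest_mountain_dp arr)

-- ===== LEMMAS AND PROOFS =====

-- arr[i] for an in-range Nat index (both ports only read in-range indices)
def pvG (arr : List Int) (i : Nat) : Int := arr.getD i 0

-- length of the strict ascent ending at i (A's left_slope[i])
def pvL (arr : List Int) : Nat → Int
  | 0 => 0
  | i + 1 => if pvG arr i < pvG arr (i + 1) then pvL arr i + 1 else 0

-- length of the strict descent starting at i (A's right_slope[i])
def pvR (arr : List Int) (i : Nat) : Nat :=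
  if h : i + 1 < arr.length ∧ pvG arr (i + 1) < pvG arr i then pvR arr (i + 1) + 1 else 0
termination_by arr.length - i
decreasing_by omega

-- length of the strict descent ending at i
def pvD (arr : List Int) : Nat → Nat
  | 0 => 0
  | k + 1 => if pvG arr (k + 1) < pvG arr k then pvD arr k + 1 else 0

def pvT (arr : List Int) (i : Nat) : Int :=
  min (pvL arr i) (min ((pvR arr i : Int)) (pvG arr i))

-- contribution of index i, counted once its descent is complete by step K
def pvW (arr : List Int) (K i : Nat) : Int :=
  if pvL arr i ≠ 0 ∧ pvR arr i ≠ 0 ∧ i + pvR arr i ≤ K then pvT arr i else 0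

def pvCB (arr : List Int) (K : Nat) : Int :=
  (List.range' 1 K).foldl (fun b i => max b (pvW arr K i)) 0

-- the invariant values of B's state after processing indices 1..k
def pvBB (arr : List Int) (k : Nat) : Int :=
  if 0 < pvD arr k ∧ pvL arr (k - pvD arr k) ≠ 0 then
    max (pvCB arr k)
      (min (pvL arr (k - pvD arr k)) (min ((pvD arr k : Int)) (pvG arr (k - pvD arr k))))
  else pvCB arr k

def pvU (arr : List Int) (k : Nat) : Int :=
  if 0 < pvD arr k then (if pvL arr (k - pvD arr k) ≠ 0 then pvL arr (k - pvD arr k) else 0)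
  else pvL arr k

def pvDd (arr : List Int) (k : Nat) : Int :=
  if 0 < pvD arr k ∧ pvL arr (k - pvD arr k) ≠ 0 then (pvD arr k : Int) else 0

-- B's loop body over Nat indices
def pvBstep (arr : List Int) (s : Int × Int × Int × Int) (k : Nat) : Int × Int × Int × Int :=
  let best := s.1
  let up := s.2.1
  let down := s.2.2.1
  let peak := s.2.2.2
  let x := pvG arr k
  let y := pvG arr (k - 1)
  if y < x then
    (best, if 0 < down then 1 else up + 1, 0, peak)
  else if x < y then
    if 0 < up then
      let peak' := if down = 0 then y else peak
      let down' := down + 1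
      let h := min up (min down' peak')
      (if best < h then h else best, up, down', peak')
    else (best, up, down, peak)
  else (best, 0, 0, peak)

def pvSt (arr : List Int) (k : Nat) : Int × Int × Int × Int :=
  (List.range' 1 k).foldl (pvBstep arr) (0, 0, 0, 0)

-- A's final scan over Nat indices
def pvSpecStep (arr : List Int) (b : Int) (i : Nat) : Int :=
  if pvL arr i = 0 ∨ (pvR arr i : Int) = 0 then b else max b (pvT arr i)

def pvSpec (arr : List Int) : Int :=
  (List.range' 1 (arr.length - 2)).foldl (pvSpecStep arr) 0

-- ---- elementary lemmas ----

lemma pv_ite_max (a b : Int) : (if a < b then b else a) = max a b := by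
  split_ifs with h
  · exact (max_eq_right h.le).symm
  · exact (max_eq_left (not_lt.mp h)).symm

lemma pvL_nonneg (arr : List Int) : ∀ i, 0 ≤ pvL arr i := by
  intro i
  induction i with
  | zero => simp [pvL]
  | succ i ih => simp only [pvL]; split <;> omega

lemma pvR_eq (arr : List Int) (i : Nat) :
    pvR arr i = if i + 1 < arr.length ∧ pvG arr (i + 1) < pvG arr i then pvR arr (i + 1) + 1 else 0 := by
  rw [pvR]; split <;> simp_all

lemma pvD_le (arr : List Int) : ∀ k, pvD arr k ≤ k := by
  intro k
  induction k with
  | zero => simp [pvD]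
  | succ k ih => simp only [pvD]; split <;> omega

-- ---- fold-max toolbox ----

lemma pvFoldMax_le (f : Nat → Int) (B : Int) :
    ∀ (l : List Nat) (b : Int), b ≤ B → (∀ i ∈ l, f i ≤ B) →
      List.foldl (fun acc i => max acc (f i)) b l ≤ B := by
  intro l
  induction l with
  | nil => intro b hb _; simpa using hb
  | cons a t ih =>
      intro b hb hf
      simp only [List.foldl_cons]
      exact ih _ (max_le hb (hf a (by simp))) (fun i hi => hf i (by simp [hi]))

lemma pv_max_eq_max (a b t : Int) (h1 : a ≤ b) (h2 : b ≤ max a t) :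
    max a t = max b t := by
  simp only [max_def] at *
  split_ifs at * <;> omega

lemma pvFold_skip_eq (arr : List Int) :
    ∀ (l : List Nat) (b : Int), 0 ≤ b →
      l.foldl (pvSpecStep arr) b =
      l.foldl (fun b i => max b (if pvL arr i = 0 ∨ (pvR arr i : Int) = 0 then 0 else pvT arr i)) b := by
  intro l
  induction l with
  | nil => intro b _; rfl
  | cons a t ih =>
      intro b hb
      simp only [List.foldl_cons]
      by_cases hc : pvL arr a = 0 ∨ (pvR arr a : Int) = 0
      · rw [show pvSpecStep arr b a = b by unfold pvSpecStep; rw [if_pos hc],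
          if_pos hc, max_eq_left hb]
        exact ih b hb
      · rw [show pvSpecStep arr b a = max b (pvT arr a) by unfold pvSpecStep; rw [if_neg hc],
          if_neg hc]
        exact ih _ (le_max_of_le_left hb)

-- ---- chain lemmas ----

lemma pvR_chain (arr : List Int) :
    ∀ (m i : Nat), m < pvR arr i → i + m + 1 < arr.length ∧ pvG arr (i + m + 1) < pvG arr (i + m) := by
  intro m
  induction m with
  | zero =>
      intro i h
      rw [pvR_eq] at h
      split at h
      · next hc => simpa using hc
      · omega
  | succ m ih =>
      intro i h
      rw [pvR_eq] at h
      split at h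
      · next hc =>
          have h2 := ih (i + 1) (by omega)
          have e1 : i + 1 + m + 1 = i + (m + 1) + 1 := by omega
          have e2 : i + 1 + m = i + (m + 1) := by omega
          rw [e1, e2] at h2
          exact h2
      · omega

lemma pvR_le (arr : List Int) : ∀ i, pvR arr i = 0 ∨ i + 1 + pvR arr i ≤ arr.length := by
  have key : ∀ (m i : Nat), arr.length ≤ i + m → pvR arr i = 0 ∨ i + 1 + pvR arr i ≤ arr.length := by
    intro m
    induction m with
    | zero =>
        intro i h
        rw [pvR_eq]
        split
        · next hc => omega
        · omega
    | succ m ih =>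
        intro i h
        rw [pvR_eq]
        split
        · next hc =>
            rcases ih (i + 1) (by omega) with h0 | hle
            · right; omega
            · right; omega
        · omega
  intro i
  exact key arr.length i (by omega)

lemma pvD_chain (arr : List Int) :
    ∀ k j, k - pvD arr k ≤ j → j < k → pvG arr (j + 1) < pvG arr j := by
  intro k
  induction k with
  | zero => intro j _ h; omega
  | succ k ih =>
      intro j hj hjk
      simp only [pvD] at hj
      split at hj
      · next hc =>
          rcases Nat.lt_succ_iff_lt_or_eq.mp hjk with h | h
          · exact ih j (by have := pvD_le arr k; omega) h
          · subst h; exact hc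
      · omega

lemma pvD_ge (arr : List Int) :
    ∀ (m k : Nat), m ≤ k + 1 → (∀ j, k + 1 - m ≤ j → j ≤ k → pvG arr (j + 1) < pvG arr j) →
      m ≤ pvD arr (k + 1) := by
  intro m
  induction m with
  | zero => intro k _ _; omega
  | succ m ih =>
      intro k hm hch
      have hdec : pvG arr (k + 1) < pvG arr k := hch k (by omega) (by omega)
      have hD : pvD arr (k + 1) = pvD arr k + 1 := by simp [pvD, hdec]
      rcases Nat.eq_zero_or_pos k with hk | hk
      · subst hk; omega
      · obtain ⟨k', rfl⟩ : ∃ k', k = k' + 1 := ⟨k - 1, by omega⟩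
        have := ih k' (by omega) (fun j h1 h2 => hch j (by omega) (by omega))
        omega

-- at a completed descent ending at k+1, a contributing start index is exactly k - pvD arr k
lemma pv_completion (arr : List Int) (k i : Nat)
    (hcomp : i + pvR arr i = k + 1) (h1 : 1 ≤ i) (hik : i ≤ k) (hL : pvL arr i ≠ 0) :
    i = k - pvD arr k ∧ pvD arr k = k - i ∧ pvG arr (k + 1) < pvG arr k := by
  have hasc : pvG arr (i - 1) < pvG arr i := by
    obtain ⟨i', rfl⟩ : ∃ i', i = i' + 1 := ⟨i - 1, by omega⟩
    simp only [pvL] at hL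
    split at hL
    · next hc => simpa using hc
    · simp at hL
  have hchain : ∀ j, i ≤ j → j ≤ k → pvG arr (j + 1) < pvG arr j := by
    intro j hij hjk
    have h2 := pvR_chain arr (j - i) i (by omega)
    have e1 : i + (j - i) + 1 = j + 1 := by omega
    have e2 : i + (j - i) = j := by omega
    rw [e1, e2] at h2
    exact h2.2
  have hdk : pvG arr (k + 1) < pvG arr k := hchain k hik (by omega)
  have hge : k - i ≤ pvD arr k := by
    rcases Nat.eq_zero_or_pos k with hk | hk
    · omega
    · obtain ⟨k', rfl⟩ : ∃ k', k = k' + 1 := ⟨k - 1, by omega⟩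
      rcases Nat.lt_or_ge k' i with h | h
      · omega
      · exact pvD_ge arr (k' + 1 - i) k' (by omega)
          (fun j hj1 hj2 => hchain j (by omega) (by omega))
  have hle : pvD arr k ≤ k - i := by
    by_contra hcon
    have hdi : k - pvD arr k ≤ i - 1 := by omega
    have h3 := pvD_chain arr k (i - 1) hdi (by omega)
    have e : i - 1 + 1 = i := by omega
    rw [e] at h3
    omega
  exact ⟨by omega, by omega, hdk⟩

-- a maximal strict descent from k-m to a stopping point k has pvR = m all along
lemma pvR_of_run (arr : List Int) (k : Nat) (hk : k < arr.length)
    (hend : ¬ (k + 1 < arr.length ∧ pvG arr (k + 1) < pvG arr k)) :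
    ∀ m, m ≤ k → (∀ t, k - m ≤ t → t < k → pvG arr (t + 1) < pvG arr t) →
      pvR arr (k - m) = m := by
  intro m
  induction m with
  | zero =>
      intro _ _
      simp only [Nat.sub_zero]
      rw [pvR_eq, if_neg hend]
  | succ m ih =>
      intro hm hrun
      have he : k - (m + 1) + 1 = k - m := by omega
      rw [pvR_eq, if_pos, he, ih (by omega) (fun t h1 h2 => hrun t (by omega) h2)]
      constructor
      · omega
      · have := hrun (k - (m + 1)) (by omega) (by omega)
        rw [he] at this ⊢
        exact this

lemma pvL_eq_zero_of_desc (arr : List Int) (k : Nat) (hd : 0 < pvD arr k) :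
    pvL arr k = 0 := by
  have hk1 : 1 ≤ k := le_trans hd (pvD_le arr k)
  have hch := pvD_chain arr k (k - 1) (by have := pvD_le arr k; omega) (by omega)
  obtain ⟨k', rfl⟩ : ∃ k', k = k' + 1 := ⟨k - 1, by omega⟩
  have h2 : pvG arr (k' + 1) < pvG arr k' := by simpa using hch
  simp only [pvL]
  rw [if_neg (lt_asymm h2)]

-- ---- pvCB lemmas ----

lemma pvCB_nonneg (arr : List Int) (K : Nat) : 0 ≤ pvCB arr K :=
  (PySem.List.le_foldl_max_int (List.range' 1 K) (pvW arr K) 0).1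

lemma pvW_le_pvCB (arr : List Int) (K i : Nat) (h : i ∈ List.range' 1 K) :
    pvW arr K i ≤ pvCB arr K :=
  (PySem.List.le_foldl_max_int (List.range' 1 K) (pvW arr K) 0).2 i h

lemma pvCB_succ_unfold (arr : List Int) (K : Nat) :
    pvCB arr (K + 1) =
      max ((List.range' 1 K).foldl (fun b i => max b (pvW arr (K + 1) i)) 0) (pvW arr (K + 1) (K + 1)) := by
  unfold pvCB
  rw [List.range'_1_concat, List.foldl_append]
  simp [Nat.add_comm 1 K]

lemma pvCB_mono_succ (arr : List Int) (K : Nat) : pvCB arr K ≤ pvCB arr (K + 1) := by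
  apply pvFoldMax_le _ _ _ _ (pvCB_nonneg arr (K + 1))
  intro i hi
  have hmem := List.mem_range'_1.mp hi
  by_cases hg : pvL arr i ≠ 0 ∧ pvR arr i ≠ 0 ∧ i + pvR arr i ≤ K
  · have h1 : pvW arr K i = pvT arr i := by simp [pvW, hg.1, hg.2.1, hg.2.2]
    have h2 : pvW arr (K + 1) i = pvT arr i := by
      simp [pvW, hg.1, hg.2.1, Nat.le_succ_of_le hg.2.2]
    rw [h1, ← h2]
    exact pvW_le_pvCB arr (K + 1) i (List.mem_range'_1.mpr ⟨hmem.1, by omega⟩)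
  · have h1 : pvW arr K i = 0 := by simp only [pvW, if_neg hg]
    rw [h1]
    exact pvCB_nonneg arr (K + 1)

lemma pvCB_succ_of_dead (arr : List Int) (k : Nat)
    (h : ∀ i, 1 ≤ i → i ≤ k → i + pvR arr i = k + 1 → pvL arr i = 0) :
    pvCB arr (k + 1) = pvCB arr k := by
  rw [pvCB_succ_unfold]
  have hW : pvW arr (k + 1) (k + 1) = 0 := by
    unfold pvW
    rw [if_neg]
    rintro ⟨_, hR, hle⟩
    omega
  rw [hW]
  have hcong : (List.range' 1 k).foldl (fun b i => max b (pvW arr (k + 1) i)) 0 = pvCB arr k := by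
    unfold pvCB
    apply PySem.List.foldl_congr_mem
    intro acc i hi
    have hmem := List.mem_range'_1.mp hi
    congr 1
    have hiff : (pvL arr i ≠ 0 ∧ pvR arr i ≠ 0 ∧ i + pvR arr i ≤ k + 1) ↔
        (pvL arr i ≠ 0 ∧ pvR arr i ≠ 0 ∧ i + pvR arr i ≤ k) := by
      constructor
      · rintro ⟨hL, hR, hle⟩
        refine ⟨hL, hR, ?_⟩
        rcases Nat.lt_or_ge (i + pvR arr i) (k + 1) with h' | h'
        · omega
        · exact absurd (h i hmem.1 (by omega) (by omega)) hL
      · rintro ⟨hL, hR, hle⟩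
        exact ⟨hL, hR, by omega⟩
    simp only [pvW]
    rw [if_congr hiff rfl rfl]
  rw [hcong]
  exact max_eq_left (pvCB_nonneg arr k)

lemma pvCB_succ_of_no_desc (arr : List Int) (k : Nat) (h : ¬ pvG arr (k + 1) < pvG arr k) :
    pvCB arr (k + 1) = pvCB arr k := by
  apply pvCB_succ_of_dead
  intro i h1 hik hcomp
  by_contra hL
  exact h (pv_completion arr k i hcomp h1 hik hL).2.2

lemma pvCB_succ_le_max (arr : List Int) (k : Nat) (_hlt : pvG arr (k + 1) < pvG arr k) :
    pvCB arr (k + 1) ≤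
      max (pvCB arr k)
        (min (pvL arr (k - pvD arr k)) (min ((pvD arr k : Int) + 1) (pvG arr (k - pvD arr k)))) := by
  unfold pvCB
  apply pvFoldMax_le
  · exact le_max_of_le_left (pvCB_nonneg arr k)
  · intro i hi
    have hmem := List.mem_range'_1.mp hi
    unfold pvW
    split_ifs with hg
    · obtain ⟨hL, hR, hle⟩ := hg
      have hik : i ≤ k := by omega
      rcases Nat.lt_or_ge (i + pvR arr i) (k + 1) with hlt2 | hge2
      · have he : pvT arr i = pvW arr k i := by
          simp [pvW, hL, hR, Nat.lt_succ_iff.mp hlt2]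
        rw [he]
        exact le_max_of_le_left (pvW_le_pvCB arr k i (List.mem_range'_1.mpr ⟨hmem.1, by omega⟩))
      · have hco : i + pvR arr i = k + 1 := by omega
        obtain ⟨hi_eq, hd_eq, _⟩ := pv_completion arr k i hco hmem.1 hik hL
        apply le_max_of_le_right
        have hRi : (pvR arr i : Int) = (pvD arr k : Int) + 1 := by
          have he2 : pvR arr i = pvD arr k + 1 := by omega
          rw [he2]
          push_cast
          ring
        rw [← hi_eq]
        unfold pvT
        rw [hRi]
    · exact le_max_of_le_left (pvCB_nonneg arr k)

-- completed-term absorption: when the descent ending at k is over, its term is already in pvCB k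
lemma pvT_le_pvCB_of_end (arr : List Int) (k : Nat)
    (hd : 0 < pvD arr k) (hL : pvL arr (k - pvD arr k) ≠ 0)
    (hk : k < arr.length)
    (hend : ¬ (k + 1 < arr.length ∧ pvG arr (k + 1) < pvG arr k)) :
    min (pvL arr (k - pvD arr k)) (min ((pvD arr k : Int)) (pvG arr (k - pvD arr k))) ≤ pvCB arr k := by
  have hp1 : 1 ≤ k - pvD arr k := by
    rcases Nat.eq_zero_or_pos (k - pvD arr k) with h0 | h
    · exfalso
      apply hL
      rw [h0]
      rfl
    · exact h
  have hplt : k - pvD arr k < k := by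
    have := pvD_le arr k
    omega
  have hRp : pvR arr (k - pvD arr k) = pvD arr k :=
    pvR_of_run arr k hk hend (pvD arr k) (pvD_le arr k)
      (fun t h1 h2 => pvD_chain arr k t h1 h2)
  have hWp : pvW arr k (k - pvD arr k) =
      min (pvL arr (k - pvD arr k)) (min ((pvD arr k : Int)) (pvG arr (k - pvD arr k))) := by
    unfold pvW pvT
    rw [if_pos ⟨hL, by omega, by omega⟩, hRp]
  rw [← hWp]
  exact pvW_le_pvCB arr k _ (List.mem_range'_1.mpr ⟨hp1, by omega⟩)

lemma pvBB_eq_pvCB_of_end (arr : List Int) (k : Nat) (hk : k < arr.length)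
    (hend : ¬ (k + 1 < arr.length ∧ pvG arr (k + 1) < pvG arr k)) :
    pvBB arr k = pvCB arr k := by
  unfold pvBB
  split_ifs with h
  · exact max_eq_left (pvT_le_pvCB_of_end arr k h.1 h.2 hk hend)
  · rfl

lemma pvCB_succ_of_desc_dead (arr : List Int) (k : Nat)
    (hLp : pvL arr (k - pvD arr k) = 0) : pvCB arr (k + 1) = pvCB arr k := by
  apply pvCB_succ_of_dead
  intro i h1 hik hcomp
  by_contra hL
  obtain ⟨hi_eq, _, _⟩ := pv_completion arr k i hcomp h1 hik hL
  rw [hi_eq] at hL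
  exact hL hLp

-- ---- the main invariant ----

theorem pvInv (arr : List Int) :
    ∀ k, k ≤ arr.length - 1 →
      (pvSt arr k).1 = pvBB arr k ∧ (pvSt arr k).2.1 = pvU arr k ∧
      (pvSt arr k).2.2.1 = pvDd arr k ∧
      (0 < pvD arr k → pvL arr (k - pvD arr k) ≠ 0 →
        (pvSt arr k).2.2.2 = pvG arr (k - pvD arr k)) := by
  intro k
  induction k with
  | zero =>
      intro _
      refine ⟨?_, ?_, ?_, ?_⟩
      · simp [pvSt, pvBB, pvD, pvCB]
      · simp [pvSt, pvU, pvD, pvL]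
      · simp [pvSt, pvDd, pvD]
      · intro h
        simp [pvD] at h
  | succ k ih =>
      intro hk1
      have hk : k ≤ arr.length - 1 := by omega
      have hkn : k + 1 < arr.length := by omega
      obtain ⟨hB, hU, hDd, hPk⟩ := ih hk
      have hSt : pvSt arr (k + 1) = pvBstep arr (pvSt arr k) (k + 1) := by
        unfold pvSt
        rw [List.range'_1_concat, List.foldl_append]
        simp [Nat.add_comm 1 k]
      rcases lt_trichotomy (pvG arr (k + 1)) (pvG arr k) with hlt | heq | hgt
      · -- strict decrease at k+1
        have hy : ¬ pvG arr k < pvG arr (k + 1) := lt_asymm hlt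
        have hD1 : pvD arr (k + 1) = pvD arr k + 1 := by
          simp only [pvD]
          rw [if_pos hlt]
        have hp1 : (k + 1) - pvD arr (k + 1) = k - pvD arr k := by
          have := pvD_le arr k
          rw [hD1]
          omega
        by_cases hd0 : 0 < pvD arr k
        · by_cases hLp : pvL arr (k - pvD arr k) ≠ 0
          · -- (i) valid descent continuing
            have hu_eq : pvU arr k = pvL arr (k - pvD arr k) := by
              unfold pvU
              rw [if_pos hd0, if_pos hLp]
            have hu_pos : (0 : Int) < pvU arr k := by
              rw [hu_eq]
              have := pvL_nonneg arr (k - pvD arr k)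
              omega
            have hdd : pvDd arr k = (pvD arr k : Int) := by
              unfold pvDd
              rw [if_pos ⟨hd0, hLp⟩]
            have hdne : pvDd arr k ≠ 0 := by
              rw [hdd]
              exact_mod_cast (by omega : pvD arr k ≠ 0)
            have hpk := hPk hd0 hLp
            have hstep : pvBstep arr (pvSt arr k) (k + 1) =
                (max (pvBB arr k)
                   (min (pvL arr (k - pvD arr k))
                     (min ((pvD arr k : Int) + 1) (pvG arr (k - pvD arr k)))),
                 pvL arr (k - pvD arr k), (pvD arr k : Int) + 1,
                 pvG arr (k - pvD arr k)) := by
              simp only [pvBstep, Nat.add_sub_cancel]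
              rw [hB, hU, hDd, hpk, if_neg hy, if_pos hlt, if_pos hu_pos,
                if_neg hdne, pv_ite_max, hu_eq, hdd]
            rw [hSt, hstep]
            have hBBk : pvBB arr k =
                max (pvCB arr k)
                  (min (pvL arr (k - pvD arr k))
                    (min ((pvD arr k : Int)) (pvG arr (k - pvD arr k)))) := by
              unfold pvBB
              rw [if_pos ⟨hd0, hLp⟩]
            have hBB1 : pvBB arr (k + 1) =
                max (pvCB arr (k + 1))
                  (min (pvL arr (k - pvD arr k))
                    (min ((pvD arr k : Int) + 1) (pvG arr (k - pvD arr k)))) := by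
              unfold pvBB
              rw [hp1, hD1, if_pos ⟨by omega, hLp⟩]
              norm_cast
            refine ⟨?_, ?_, ?_, ?_⟩
            · show max (pvBB arr k) _ = pvBB arr (k + 1)
              rw [hBBk, hBB1, max_assoc,
                max_eq_right (min_le_min le_rfl (min_le_min (by omega) le_rfl))]
              exact pv_max_eq_max _ _ _ (pvCB_mono_succ arr k) (pvCB_succ_le_max arr k hlt)
            · show pvL arr (k - pvD arr k) = pvU arr (k + 1)
              unfold pvU
              rw [hp1, hD1, if_pos (by omega), if_pos hLp]
            · show (pvD arr k : Int) + 1 = pvDd arr (k + 1)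
              unfold pvDd
              rw [hp1, hD1, if_pos ⟨by omega, hLp⟩]
              norm_cast
            · intro _ _
              show pvG arr (k - pvD arr k) = _
              rw [hp1]
          · -- (ii) descent without a left slope: state unchanged
            have hLp0 : pvL arr (k - pvD arr k) = 0 := not_not.mp hLp
            have hu0 : pvU arr k = 0 := by
              unfold pvU
              rw [if_pos hd0, if_neg (by simp [hLp0])]
            have hdd0 : pvDd arr k = 0 := by
              unfold pvDd
              rw [if_neg (by rintro ⟨_, h⟩; exact h hLp0)]
            have hnu : ¬ (0 : Int) < pvU arr k := by
              rw [hu0]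
              exact lt_irrefl 0
            have hstep : pvBstep arr (pvSt arr k) (k + 1) =
                (pvBB arr k, pvU arr k, pvDd arr k, (pvSt arr k).2.2.2) := by
              simp only [pvBstep, Nat.add_sub_cancel]
              rw [hB, hU, hDd, if_neg hy, if_pos hlt, if_neg hnu]
            rw [hSt, hstep]
            refine ⟨?_, ?_, ?_, ?_⟩
            · show pvBB arr k = pvBB arr (k + 1)
              unfold pvBB
              rw [if_neg (by rintro ⟨_, h⟩; exact h hLp0),
                if_neg (by rw [hp1]; rintro ⟨_, h⟩; exact h hLp0)]
              exact (pvCB_succ_of_desc_dead arr k hLp0).symm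
            · show pvU arr k = pvU arr (k + 1)
              rw [hu0]
              unfold pvU
              rw [hp1, hD1, if_pos (by omega), if_neg (by simp [hLp0])]
            · show pvDd arr k = pvDd arr (k + 1)
              rw [hdd0]
              unfold pvDd
              rw [hp1, if_neg (by rintro ⟨_, h⟩; exact h hLp0)]
            · intro _ h2
              rw [hp1] at h2
              exact absurd hLp0 h2
        · -- (iii) no running descent before k+1
          have hd00 : pvD arr k = 0 := by omega
          have hp0 : k - pvD arr k = k := by omega
          have hp1' : (k + 1) - pvD arr (k + 1) = k := by omega
          have hu_eq : pvU arr k = pvL arr k := by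
            unfold pvU
            rw [if_neg hd0]
          have hdd0 : pvDd arr k = 0 := by
            unfold pvDd
            rw [if_neg (fun h => hd0 h.1)]
          have hD11 : pvD arr (k + 1) = 1 := by rw [hD1, hd00]
          by_cases hLk : pvL arr k ≠ 0
          · -- (iii-a) a mountain starts its descent at k+1
            have hupos : (0 : Int) < pvU arr k := by
              rw [hu_eq]
              have := pvL_nonneg arr k
              omega
            have hstep : pvBstep arr (pvSt arr k) (k + 1) =
                (max (pvBB arr k) (min (pvL arr k) (min 1 (pvG arr k))),
                 pvL arr k, 1, pvG arr k) := by
              simp only [pvBstep, Nat.add_sub_cancel]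
              rw [hB, hU, hDd, if_neg hy, if_pos hlt, if_pos hupos,
                if_pos hdd0, pv_ite_max, hu_eq, hdd0]
              norm_num
            rw [hSt, hstep]
            have hBBk : pvBB arr k = pvCB arr k := by
              unfold pvBB
              rw [if_neg (by rintro ⟨h, _⟩; omega)]
            have hBB1 : pvBB arr (k + 1) =
                max (pvCB arr (k + 1)) (min (pvL arr k) (min 1 (pvG arr k))) := by
              unfold pvBB
              rw [hp1', hD11, if_pos ⟨by omega, hLk⟩]
              norm_num
            refine ⟨?_, ?_, ?_, ?_⟩
            · show max (pvBB arr k) _ = pvBB arr (k + 1)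
              rw [hBBk, hBB1]
              have hle := pvCB_succ_le_max arr k hlt
              rw [hp0, hd00] at hle
              simp only [Nat.cast_zero, zero_add] at hle
              exact pv_max_eq_max _ _ _ (pvCB_mono_succ arr k) hle
            · show pvL arr k = pvU arr (k + 1)
              unfold pvU
              rw [hp1', hD11, if_pos (by omega), if_pos hLk]
            · show (1 : Int) = pvDd arr (k + 1)
              unfold pvDd
              rw [hp1', hD11, if_pos ⟨by omega, hLk⟩]
              norm_num
            · intro _ _
              show pvG arr k = _
              rw [hp1']
          · -- (iii-b) decrease with no ascent before it: state unchanged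
            have hLk0 : pvL arr k = 0 := not_not.mp hLk
            have hu0 : pvU arr k = 0 := by rw [hu_eq, hLk0]
            have hnu : ¬ (0 : Int) < pvU arr k := by
              rw [hu0]
              exact lt_irrefl 0
            have hstep : pvBstep arr (pvSt arr k) (k + 1) =
                (pvBB arr k, pvU arr k, pvDd arr k, (pvSt arr k).2.2.2) := by
              simp only [pvBstep, Nat.add_sub_cancel]
              rw [hB, hU, hDd, if_neg hy, if_pos hlt, if_neg hnu]
            rw [hSt, hstep]
            refine ⟨?_, ?_, ?_, ?_⟩
            · show pvBB arr k = pvBB arr (k + 1)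
              unfold pvBB
              rw [if_neg (by rintro ⟨h, _⟩; omega),
                if_neg (by rw [hp1']; rintro ⟨_, h⟩; exact h hLk0)]
              exact (pvCB_succ_of_desc_dead arr k (by rw [hp0]; exact hLk0)).symm
            · show pvU arr k = pvU arr (k + 1)
              rw [hu0]
              unfold pvU
              rw [hp1', hD11, if_pos (by omega), if_neg (by simp [hLk0])]
            · show pvDd arr k = pvDd arr (k + 1)
              rw [hdd0]
              unfold pvDd
              rw [hp1', if_neg (by rintro ⟨_, h⟩; exact h hLk0)]
            · intro _ h2
              rw [hp1'] at h2
              exact absurd hLk0 h2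
      · -- equal neighbours: counters reset
        have hne1 : ¬ pvG arr k < pvG arr (k + 1) := by
          rw [heq]
          exact lt_irrefl _
        have hne2 : ¬ pvG arr (k + 1) < pvG arr k := by
          rw [heq]
          exact lt_irrefl _
        have hD1 : pvD arr (k + 1) = 0 := by
          simp only [pvD]
          rw [if_neg hne2]
        have hstep : pvBstep arr (pvSt arr k) (k + 1) =
            (pvBB arr k, 0, 0, (pvSt arr k).2.2.2) := by
          simp only [pvBstep, Nat.add_sub_cancel]
          rw [hB, if_neg hne1, if_neg hne2]
        rw [hSt, hstep]
        refine ⟨?_, ?_, ?_, ?_⟩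
        · show pvBB arr k = pvBB arr (k + 1)
          rw [pvBB_eq_pvCB_of_end arr k (by omega) (fun h => hne2 h.2)]
          unfold pvBB
          rw [hD1, if_neg (by rintro ⟨h, _⟩; omega)]
          exact (pvCB_succ_of_no_desc arr k hne2).symm
        · show (0 : Int) = pvU arr (k + 1)
          have hL1 : pvL arr (k + 1) = 0 := by
            simp only [pvL]
            rw [if_neg hne1]
          unfold pvU
          rw [hD1, if_neg (by omega), hL1]
        · show (0 : Int) = pvDd arr (k + 1)
          unfold pvDd
          rw [hD1, if_neg (by rintro ⟨h, _⟩; omega)]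
        · intro h _
          rw [hD1] at h
          exact absurd h (lt_irrefl 0)
      · -- strict increase at k+1
        have hne2 : ¬ pvG arr (k + 1) < pvG arr k := lt_asymm hgt
        have hD1 : pvD arr (k + 1) = 0 := by
          simp only [pvD]
          rw [if_neg hne2]
        have hL1 : pvL arr (k + 1) = pvL arr k + 1 := by
          simp only [pvL]
          rw [if_pos hgt]
        have hstep : pvBstep arr (pvSt arr k) (k + 1) =
            (pvBB arr k, if 0 < pvDd arr k then 1 else pvU arr k + 1, 0,
             (pvSt arr k).2.2.2) := by
          simp only [pvBstep, Nat.add_sub_cancel]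
          rw [hB, hU, hDd, if_pos hgt]
        rw [hSt, hstep]
        refine ⟨?_, ?_, ?_, ?_⟩
        · show pvBB arr k = pvBB arr (k + 1)
          rw [pvBB_eq_pvCB_of_end arr k (by omega) (fun h => hne2 h.2)]
          unfold pvBB
          rw [hD1, if_neg (by rintro ⟨h, _⟩; omega)]
          exact (pvCB_succ_of_no_desc arr k hne2).symm
        · show (if 0 < pvDd arr k then 1 else pvU arr k + 1) = pvU arr (k + 1)
          have hU1 : pvU arr (k + 1) = pvL arr k + 1 := by
            unfold pvU
            rw [hD1, if_neg (by omega), hL1]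
          rw [hU1]
          by_cases hc : 0 < pvD arr k ∧ pvL arr (k - pvD arr k) ≠ 0
          · have hddpos : (0 : Int) < pvDd arr k := by
              unfold pvDd
              rw [if_pos hc]
              exact_mod_cast hc.1
            rw [if_pos hddpos]
            have hz := pvL_eq_zero_of_desc arr k hc.1
            omega
          · have hdd0 : pvDd arr k = 0 := by
              unfold pvDd
              rw [if_neg hc]
            rw [hdd0, if_neg (lt_irrefl 0)]
            by_cases hd0 : 0 < pvD arr k
            · have hLp : pvL arr (k - pvD arr k) = 0 := by
                by_contra h
                exact hc ⟨hd0, h⟩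
              have hUk : pvU arr k = 0 := by
                unfold pvU
                rw [if_pos hd0, if_neg (by simp [hLp])]
              have hz := pvL_eq_zero_of_desc arr k hd0
              rw [hUk, hz]
            · unfold pvU
              rw [if_neg hd0]
        · show (0 : Int) = pvDd arr (k + 1)
          unfold pvDd
          rw [hD1, if_neg (by rintro ⟨h, _⟩; omega)]
        · intro h _
          rw [hD1] at h
          exact absurd h (lt_irrefl 0)

-- ---- assembling the two ports ----

lemma pv_getD_replicate (n j : Nat) : (List.replicate n (0 : Int)).getD j 0 = 0 := by
  rw [List.getD_eq_getElem?_getD, List.getElem?_replicate]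
  split <;> rfl

lemma pv_pySetD_eq_set (xs : List Int) (k : Nat) (v : Int) (h : k < xs.length) :
    PySem.List.pySetD xs (k : Int) v = xs.set k v := by
  simp [PySem.List.pySetD, PySem.List.pySet?, PySem.List.pyIdx?, h]

lemma pv_getD_set (ls : List Int) (k j : Nat) (v : Int) :
    (ls.set k v).getD j 0 = if j = k ∧ k < ls.length then v else ls.getD j 0 := by
  rw [List.getD_eq_getElem?_getD, List.getD_eq_getElem?_getD, List.getElem?_set]
  by_cases h1 : k = j
  · subst h1
    by_cases h2 : k < ls.length
    · simp [h2]
    · simp [h2]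
  · rw [if_neg h1, if_neg (by rintro ⟨h, _⟩; exact h1 h.symm)]

lemma pvG_eq (arr : List Int) (j : Nat) : arr.getD j 0 = pvG arr j := rfl

lemma pvL_succ (arr : List Int) (i : Nat) :
    pvL arr (i + 1) = if pvG arr i < pvG arr (i + 1) then pvL arr i + 1 else 0 := by
  simp only [pvL]

lemma pvAleft_spec (arr : List Int) :
    ∀ k, k ≤ arr.length →
      (pvAleft arr (k : Int)).length = arr.length ∧
      ∀ j : Nat, (pvAleft arr (k : Int)).getD j 0 = if j < k then pvL arr j else 0 := by
  intro k
  induction k with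
  | zero =>
      intro _
      unfold pvAleft
      rw [PySem.List.pyRange_one_eq_nil (by norm_num), List.foldl_nil]
      refine ⟨by simp, fun j => ?_⟩
      rw [pv_getD_replicate, if_neg (by omega)]
  | succ k ih =>
      intro hk
      rcases Nat.eq_zero_or_pos k with rfl | hk1
      · unfold pvAleft
        rw [show (((0 : Nat) + 1 : Nat) : Int) = 1 by norm_num,
          PySem.List.pyRange_one_eq_nil (le_refl 1), List.foldl_nil]
        refine ⟨by simp, fun j => ?_⟩
        rw [pv_getD_replicate]
        by_cases hj : j < 0 + 1
        · have hj0 : j = 0 := by omega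
          subst hj0
          rw [if_pos hj]
          rfl
        · rw [if_neg hj]
      · obtain ⟨k', rfl⟩ : ∃ k', k = k' + 1 := ⟨k - 1, by omega⟩
        obtain ⟨hlen, hget⟩ := ih (by omega)
        have hslt : (k' + 1 : Nat) < (pvAleft arr ((k' + 1 : Nat) : Int)).length := by
          rw [hlen]
          omega
        have hgk' : (pvAleft arr ((k' + 1 : Nat) : Int)).getD k' 0 = pvL arr k' := by
          rw [hget k', if_pos (by omega)]
        have hsplit : pvAleft arr ((k' + 1 + 1 : Nat) : Int) =
            if pvG arr k' < pvG arr (k' + 1) then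
              (pvAleft arr ((k' + 1 : Nat) : Int)).set (k' + 1)
                ((pvAleft arr ((k' + 1 : Nat) : Int)).getD k' 0 + 1)
            else pvAleft arr ((k' + 1 : Nat) : Int) := by
          have hfold : pvAleft arr ((k' + 1 + 1 : Nat) : Int) =
              (if PySem.List.pyGetD arr (((k' + 1 : Nat) : Int) - 1) 0 <
                  PySem.List.pyGetD arr ((k' + 1 : Nat) : Int) 0 then
                PySem.List.pySetD (pvAleft arr ((k' + 1 : Nat) : Int)) ((k' + 1 : Nat) : Int)
                  (PySem.List.pyGetD (pvAleft arr ((k' + 1 : Nat) : Int))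
                    (((k' + 1 : Nat) : Int) - 1) 0 + 1)
              else pvAleft arr ((k' + 1 : Nat) : Int)) := by
            conv_lhs => unfold pvAleft
            conv_rhs => unfold pvAleft
            rw [show ((k' + 1 + 1 : Nat) : Int) = ((k' + 1 : Nat) : Int) + 1 by omega,
              PySem.List.pyRange_one_succ_right (show (1 : Int) ≤ ((k' + 1 : Nat) : Int) by omega),
              List.foldl_append, List.foldl_cons, List.foldl_nil]
          rw [hfold, show (((k' + 1 : Nat) : Int) - 1) = ((k' : Nat) : Int) by omega,
            PySem.List.pyGetD_natCast, PySem.List.pyGetD_natCast, PySem.List.pyGetD_natCast,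
            pv_pySetD_eq_set _ _ _ hslt, pvG_eq arr k', pvG_eq arr (k' + 1)]
        constructor
        · rw [hsplit]
          split_ifs
          · rw [List.length_set, hlen]
          · exact hlen
        · intro j
          rw [hsplit]
          by_cases hcnd : pvG arr k' < pvG arr (k' + 1)
          · rw [if_pos hcnd, pv_getD_set]
            by_cases hj : j = k' + 1
            · subst hj
              rw [if_pos ⟨rfl, hslt⟩, hgk', if_pos (show k' + 1 < k' + 1 + 1 by omega),
                pvL_succ, if_pos hcnd]
            · rw [if_neg (fun h => hj h.1), hget j]
              by_cases hjk : j < k' + 1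
              · rw [if_pos hjk, if_pos (show j < k' + 1 + 1 by omega)]
              · rw [if_neg hjk, if_neg (show ¬ j < k' + 1 + 1 by omega)]
          · rw [if_neg hcnd, hget j]
            by_cases hjk : j < k' + 1
            · rw [if_pos hjk, if_pos (show j < k' + 1 + 1 by omega)]
            · by_cases hj2 : j = k' + 1
              · subst hj2
                rw [if_neg hjk, if_pos (show k' + 1 < k' + 1 + 1 by omega), pvL_succ,
                  if_neg hcnd]
              · rw [if_neg hjk, if_neg (show ¬ j < k' + 1 + 1 by omega)]

-- the loop body of A's right-to-left pass (named for the proofs; defeq to the inline lambda)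
def pvRstep (arr : List Int) (rs : List Int) (i : Int) : List Int :=
  if PySem.List.pyGetD arr (i + 1) 0 < PySem.List.pyGetD arr i 0 then
    PySem.List.pySetD rs i (PySem.List.pyGetD rs (i + 1) 0 + 1)
  else rs

lemma pvAright_loop (arr : List Int) :
    ∀ (m : Nat), ∀ (ls : List Int), m + 1 < arr.length → ls.length = arr.length →
      (∀ j : Nat, ls.getD j 0 = if m < j then (pvR arr j : Int) else 0) →
      ((PySem.List.pyRange (m : Int) (-1) (-1)).foldl (pvRstep arr) ls).length = arr.length ∧
      ∀ j : Nat, ((PySem.List.pyRange (m : Int) (-1) (-1)).foldl (pvRstep arr) ls).getD j 0 =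
        (pvR arr j : Int) := by
  intro m
  induction m with
  | zero =>
      intro ls h1 h2 h3
      rw [PySem.List.pyRange_neg_one_cons (show (-1 : Int) < ((0 : Nat) : Int) by norm_num),
        show (((0 : Nat) : Int) - 1) = -1 by norm_num,
        PySem.List.pyRange_neg_one_eq_nil (le_refl _), List.foldl_cons, List.foldl_nil]
      have hstep : pvRstep arr ls ((0 : Nat) : Int) =
          if pvG arr 1 < pvG arr 0 then ls.set 0 (ls.getD 1 0 + 1) else ls := by
        unfold pvRstep
        rw [show (((0 : Nat) : Int) + 1) = ((1 : Nat) : Int) by omega,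
          PySem.List.pyGetD_natCast, PySem.List.pyGetD_natCast, PySem.List.pyGetD_natCast,
          pvG_eq arr 1, pvG_eq arr 0]
        split_ifs with hc
        · rw [pv_pySetD_eq_set _ _ _ (by omega)]
        · rfl
      rw [hstep]
      have hR0 : pvR arr 0 = if 0 + 1 < arr.length ∧ pvG arr 1 < pvG arr 0 then pvR arr 1 + 1
          else 0 := pvR_eq arr 0
      split_ifs with hc
      · refine ⟨by rw [List.length_set, h2], fun j => ?_⟩
        rw [pv_getD_set]
        by_cases hj : j = 0
        · subst hj
          rw [if_pos ⟨rfl, by omega⟩, h3 1, if_pos (show 0 < 1 by omega), hR0,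
            if_pos ⟨by omega, hc⟩]
          all_goals omega
        · rw [if_neg (fun h => hj h.1), h3 j, if_pos (show 0 < j by omega)]
      · refine ⟨h2, fun j => ?_⟩
        by_cases hj : j = 0
        · subst hj
          rw [h3 0, if_neg (lt_irrefl 0), hR0, if_neg (fun h => hc h.2)]
          norm_num
        · rw [h3 j, if_pos (show 0 < j by omega)]
  | succ m ih =>
      intro ls h1 h2 h3
      rw [PySem.List.pyRange_neg_one_cons (show (-1 : Int) < ((m + 1 : Nat) : Int) by omega),
        show (((m + 1 : Nat) : Int) - 1) = ((m : Nat) : Int) by omega, List.foldl_cons]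
      have hstep : pvRstep arr ls ((m + 1 : Nat) : Int) =
          if pvG arr (m + 2) < pvG arr (m + 1) then
            ls.set (m + 1) (ls.getD (m + 2) 0 + 1)
          else ls := by
        unfold pvRstep
        rw [show (((m + 1 : Nat) : Int) + 1) = ((m + 2 : Nat) : Int) by omega,
          PySem.List.pyGetD_natCast, PySem.List.pyGetD_natCast, PySem.List.pyGetD_natCast,
          pvG_eq arr (m + 2), pvG_eq arr (m + 1)]
        split_ifs with hc
        · rw [pv_pySetD_eq_set _ _ _ (by omega)]
        · rfl
      rw [hstep]
      have hR1 : pvR arr (m + 1) =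
          if m + 1 + 1 < arr.length ∧ pvG arr (m + 2) < pvG arr (m + 1) then pvR arr (m + 2) + 1
          else 0 := pvR_eq arr (m + 1)
      split_ifs with hc
      · apply ih _ (by omega) (by rw [List.length_set, h2])
        intro j
        rw [pv_getD_set]
        by_cases hj : j = m + 1
        · subst hj
          rw [if_pos ⟨rfl, by omega⟩, if_pos (show m < m + 1 by omega), h3 (m + 2),
            if_pos (show m + 1 < m + 2 by omega), hR1, if_pos ⟨by omega, hc⟩]
          all_goals omega
        · rw [if_neg (fun h => hj h.1), h3 j]
          by_cases hjm : m < j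
          · rw [if_pos (show m + 1 < j by omega), if_pos hjm]
          · rw [if_neg (show ¬ m + 1 < j by omega), if_neg hjm]
      · apply ih _ (by omega) h2
        intro j
        rw [h3 j]
        by_cases hj : j = m + 1
        · subst hj
          rw [if_neg (lt_irrefl _), if_pos (show m < m + 1 by omega), hR1,
            if_neg (fun h => hc h.2)]
          norm_num
        · by_cases hjm : m < j
          · rw [if_pos (show m + 1 < j by omega), if_pos hjm]
          · rw [if_neg (show ¬ m + 1 < j by omega), if_neg hjm]

lemma pvAfinal (arr left right : List Int)
    (hl : ∀ j : Nat, j < arr.length → left.getD j 0 = pvL arr j)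
    (hr : ∀ j : Nat, right.getD j 0 = (pvR arr j : Int)) :
    ∀ (K : Nat), K ≤ arr.length → ∀ (b : Int),
      (PySem.List.pyRange 1 (K : Int) 1).foldl
        (fun best i =>
          let l := PySem.List.pyGetD left i 0
          let r := PySem.List.pyGetD right i 0
          if l = 0 ∨ r = 0 then best
          else max best (min l (min r (PySem.List.pyGetD arr i 0)))) b =
      (List.range' 1 (K - 1)).foldl (pvSpecStep arr) b := by
  intro K
  induction K with
  | zero =>
      intro _ b
      rw [PySem.List.pyRange_one_eq_nil (by norm_num)]
      rfl
  | succ K ihK =>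
      intro hK b
      rcases Nat.eq_zero_or_pos K with rfl | hK1
      · rw [show (((0 : Nat) + 1 : Nat) : Int) = 1 by norm_num,
          PySem.List.pyRange_one_eq_nil (le_refl 1)]
        rfl
      · obtain ⟨K', rfl⟩ : ∃ K', K = K' + 1 := ⟨K - 1, by omega⟩
        rw [show ((K' + 1 + 1 : Nat) : Int) = ((K' + 1 : Nat) : Int) + 1 by omega,
          PySem.List.pyRange_one_succ_right (show (1 : Int) ≤ ((K' + 1 : Nat) : Int) by omega),
          List.foldl_append, List.foldl_cons, List.foldl_nil, ihK (by omega) b]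
        rw [show (K' + 1 + 1 : Nat) - 1 = K' + 1 by omega, List.range'_1_concat,
          List.foldl_append, List.foldl_cons, List.foldl_nil,
          show (K' + 1 : Nat) - 1 = K' by omega, show 1 + K' = K' + 1 by omega]
        simp only [PySem.List.pyGetD_natCast, hl (K' + 1) (by omega), hr (K' + 1)]
        rfl

theorem pvA_eq_pvSpec (arr : List Int) : largest_mountain_dp arr = pvSpec arr := by
  simp only [largest_mountain_dp]
  rcases Nat.lt_or_ge arr.length 2 with hn | hn
  · rw [PySem.List.pyRange_one_eq_nil (by omega : (arr.length : Int) - 1 ≤ 1)]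
    unfold pvSpec
    rw [show arr.length - 2 = 0 by omega]
    rfl
  · obtain ⟨hllen, hlget⟩ := pvAleft_spec arr arr.length (le_refl _)
    have hrinit : ∀ j : Nat, (List.replicate arr.length (0 : Int)).getD j 0 =
        if arr.length - 2 < j then (pvR arr j : Int) else 0 := by
      intro j
      rw [pv_getD_replicate]
      split_ifs with h
      · rw [pvR_eq, if_neg (fun h2 => by omega)]
        norm_num
      · rfl
    have hright : pvAright arr ((arr.length : Int) - 2) =
        (PySem.List.pyRange ((arr.length - 2 : Nat) : Int) (-1) (-1)).foldl (pvRstep arr)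
          (List.replicate arr.length (0 : Int)) := by
      rw [show ((arr.length : Int) - 2) = ((arr.length - 2 : Nat) : Int) by omega]
      rfl
    obtain ⟨hrlen, hrget⟩ := pvAright_loop arr (arr.length - 2)
      (List.replicate arr.length (0 : Int)) (by omega) (by simp) hrinit
    have hr' : ∀ j : Nat, (pvAright arr ((arr.length : Int) - 2)).getD j 0 = (pvR arr j : Int) := by
      intro j
      rw [hright]
      exact hrget j
    have hl' : ∀ j : Nat, j < arr.length →
        (pvAleft arr (arr.length : Int)).getD j 0 = pvL arr j := by
      intro j hj
      rw [hlget j, if_pos hj]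
    rw [show ((arr.length : Int) - 1) = ((arr.length - 1 : Nat) : Int) by omega,
      pvAfinal arr _ _ hl' hr' (arr.length - 1) (by omega) 0]
    unfold pvSpec
    rw [show arr.length - 1 - 1 = arr.length - 2 by omega]

lemma pvB_bridge (arr : List Int) :
    ∀ (K : Nat) (s : Int × Int × Int × Int),
      (PySem.List.pyRange 1 (K : Int) 1).foldl
        (fun (s : Int × Int × Int × Int) i =>
          let best := s.1
          let up := s.2.1
          let down := s.2.2.1
          let peak := s.2.2.2
          let x := PySem.List.pyGetD arr i 0
          let y := PySem.List.pyGetD arr (i - 1) 0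
          if y < x then
            (best, if 0 < down then 1 else up + 1, 0, peak)
          else if x < y then
            if 0 < up then
              let peak' := if down = 0 then y else peak
              let down' := down + 1
              let h := min up (min down' peak')
              (if best < h then h else best, up, down', peak')
            else (best, up, down, peak)
          else (best, 0, 0, peak)) s =
      (List.range' 1 (K - 1)).foldl (pvBstep arr) s := by
  intro K
  induction K with
  | zero =>
      intro s
      rw [PySem.List.pyRange_one_eq_nil (by norm_num)]
      rfl
  | succ K ihK =>
      intro s
      rcases Nat.eq_zero_or_pos K with rfl | hK1
      · rw [show (((0 : Nat) + 1 : Nat) : Int) = 1 by norm_num,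
          PySem.List.pyRange_one_eq_nil (le_refl 1)]
        rfl
      · obtain ⟨K', rfl⟩ : ∃ K', K = K' + 1 := ⟨K - 1, by omega⟩
        rw [show ((K' + 1 + 1 : Nat) : Int) = ((K' + 1 : Nat) : Int) + 1 by omega,
          PySem.List.pyRange_one_succ_right (show (1 : Int) ≤ ((K' + 1 : Nat) : Int) by omega),
          List.foldl_append, List.foldl_cons, List.foldl_nil, ihK s]
        rw [show (K' + 1 + 1 : Nat) - 1 = K' + 1 by omega, List.range'_1_concat,
          List.foldl_append, List.foldl_cons, List.foldl_nil,
          show (K' + 1 : Nat) - 1 = K' by omega, show 1 + K' = K' + 1 by omega,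
          show (((K' + 1 : Nat) : Int) - 1) = ((K' : Nat) : Int) by omega]
        simp only [pvBstep, Nat.add_sub_cancel, PySem.List.pyGetD_natCast]
        rfl

theorem pvB_eq_pvCB (arr : List Int) :
    largest_mountain_dp_alt arr = pvCB arr (arr.length - 1) := by
  have hB : largest_mountain_dp_alt arr = (pvSt arr (arr.length - 1)).1 := by
    unfold largest_mountain_dp_alt pvBloop
    rw [pvB_bridge arr arr.length (0, 0, 0, 0)]
    rfl
  rw [hB, (pvInv arr (arr.length - 1) (le_refl _)).1]
  rcases Nat.eq_zero_or_pos arr.length with h0 | h0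
  · rw [h0]
    unfold pvBB
    rw [if_neg (by rintro ⟨h, _⟩; simp [pvD] at h)]
  · exact pvBB_eq_pvCB_of_end arr (arr.length - 1) (by omega) (by rintro ⟨h, _⟩; omega)

theorem pvCB_eq_pvSpec (arr : List Int) : pvCB arr (arr.length - 1) = pvSpec arr := by
  rcases Nat.lt_or_ge arr.length 2 with hn | hn
  · rw [show arr.length - 1 = 0 by omega]
    unfold pvSpec
    rw [show arr.length - 2 = 0 by omega]
    rfl
  · obtain ⟨K', hK⟩ : ∃ K', arr.length - 1 = K' + 1 := ⟨arr.length - 2, by omega⟩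
    have hK2 : arr.length - 2 = K' := by omega
    rw [hK, pvCB_succ_unfold]
    have hlast : pvW arr (K' + 1) (K' + 1) = 0 := by
      unfold pvW
      rw [if_neg]
      rintro ⟨_, hR, hle⟩
      omega
    rw [hlast, max_eq_left (PySem.List.le_foldl_max_int (List.range' 1 K') (pvW arr (K' + 1)) 0).1]
    unfold pvSpec
    rw [hK2, pvFold_skip_eq arr (List.range' 1 K') 0 (le_refl 0)]
    apply PySem.List.foldl_congr_mem
    intro acc i hi
    have hmem := List.mem_range'_1.mp hi
    congr 1
    unfold pvW
    by_cases hg : pvL arr i = 0 ∨ (pvR arr i : Int) = 0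
    · have hneg : ¬ (pvL arr i ≠ 0 ∧ pvR arr i ≠ 0 ∧ i + pvR arr i ≤ K' + 1) := by
        rintro ⟨h1, h2, _⟩
        rcases hg with hg | hg
        · exact h1 hg
        · exact h2 (by exact_mod_cast hg)
      rw [if_neg hneg, if_pos hg]
    · have h1 : pvL arr i ≠ 0 := fun h => hg (Or.inl h)
      have h2 : pvR arr i ≠ 0 := fun h => hg (Or.inr (by exact_mod_cast h))
      have h3 : i + pvR arr i ≤ K' + 1 := by
        rcases pvR_le arr i with h | h
        · omega
        · omega
      rw [if_pos ⟨h1, h2, h3⟩, if_neg hg]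

-- ===== VERDICT (by name: the statement is the Claim_ definition above) =====
theorem largest_mountain_dp_spec : Claim_equal_largest_mountain_dp := by
  intro arr _
  unfold Spec_largest_mountain_dp
  rw [pvA_eq_pvSpec, pvB_eq_pvCB, pvCB_eq_pvSpec]
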